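-- pv_equiv track=rewrite | github.com/keeeeeey/baekjoon_algorithm | 시험/11번가/task2.py | solution
-- ===== SOURCE A (Python) =====
-- def adjacent(A_sorted, start, end, l):
--     for i in range(start + 1, end):
--         s = 0
--         e = l - 1
--         while s <= e:
--             mid = (s + e) // 2
--             if A_sorted[mid] > i:
--                 e = mid - 1
--             elif A_sorted[mid] < i:
--                 s = mid + 1
--             else:
--                 return False
--     return True
--
-- def solution(A):
--     l = len(A)
--     A_sorted = sorted(A)
--     answer = int(1e9)
--     for i in range(l - 1):
--
--         for j in range(i + 1, l):
--             flag = True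
--             if A[i] > A[j]:
--                 flag = adjacent(A_sorted, A[j], A[i], l)
--             elif A[i] < A[j]:
--                 flag = adjacent(A_sorted, A[i], A[j], l)
--
--             if flag:
--                 answer = min(answer, abs(A[i] - A[j]))
--     return answer
-- ===== SOURCE B (Python) =====
-- def solution(A):
--     s = sorted(A)
--     answer = 10 ** 9
--     for a, b in zip(s, s[1:]):
--         answer = min(answer, b - a)
--     return answer
-- ===== Notes on version B (the rewrite author's own statement) =====
-- stated objective: faster
-- what changed: A tests every pair with a per-integer binary search over the whole value gap (no element strictly between two values iff they are adjacent in sorted order), B just sorts once and takes the minimum of consecutive differences.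
import Mathlib
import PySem

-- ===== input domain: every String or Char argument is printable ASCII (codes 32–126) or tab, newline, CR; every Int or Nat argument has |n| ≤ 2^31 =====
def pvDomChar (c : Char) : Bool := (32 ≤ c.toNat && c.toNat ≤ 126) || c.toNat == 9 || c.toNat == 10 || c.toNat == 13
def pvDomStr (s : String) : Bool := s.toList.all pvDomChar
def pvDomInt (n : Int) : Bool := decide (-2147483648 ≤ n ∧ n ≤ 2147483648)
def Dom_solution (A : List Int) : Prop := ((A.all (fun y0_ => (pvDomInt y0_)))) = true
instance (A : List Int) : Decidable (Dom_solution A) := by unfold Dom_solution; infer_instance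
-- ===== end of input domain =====

-- B replaces A's all-pairs scan (with a per-integer binary search across each value gap)
-- by one sort followed by the minimum of consecutive differences: same value, asymptotically faster.

-- ===== PORT A =====
-- the `while s <= e` binary-search loop of `adjacent`; the index `mid` is provably
-- inside the list whenever it is read (0 ≤ s ≤ mid ≤ e ≤ l-1), so `pyGetD _ _ 0` is exact
def adjacentLoop (As : List Int) (i : Int) (s e : Int) : Bool :=
  if h : s ≤ e then
    let mid := PySem.Int.floordiv (s + e) 2
    if PySem.List.pyGetD As mid 0 > i then adjacentLoop As i s (mid - 1)
    else if PySem.List.pyGetD As mid 0 < i then adjacentLoop As i (mid + 1) e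
    else false
  else true
termination_by (e + 1 - s).toNat
decreasing_by
  all_goals
    obtain ⟨h1, h2⟩ := PySem.Int.floordiv_two_mid_bounds h
    omega

-- `for i in range(start+1, end): … return False … / return True` = all iterations pass
def adjacent (As : List Int) (start stop l : Int) : Bool :=
  (PySem.List.pyRange (start + 1) stop 1).all (fun i => adjacentLoop As i 0 (l - 1))

def solution (A : List Int) : Int :=
  let l : Int := A.length
  let As := PySem.List.sorted A (fun x => x) false
  (PySem.List.pyRange 0 (l - 1) 1).foldl (fun answer i =>
    (PySem.List.pyRange (i + 1) l 1).foldl (fun answer j =>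
      let ai := PySem.List.pyGetD A i 0
      let aj := PySem.List.pyGetD A j 0
      let flag := if ai > aj then adjacent As aj ai l
                  else if ai < aj then adjacent As ai aj l
                  else true
      if flag then min answer |ai - aj| else answer) answer) 1000000000

-- ===== PORT B =====
def solution_alt (A : List Int) : Int :=
  let s := PySem.List.sorted A (fun x => x) false
  (s.zip (PySem.List.slice s (some 1) none)).foldl
    (fun answer p => min answer (p.2 - p.1)) 1000000000

-- ===== PRECONDITION & SPEC =====
def Spec_solution (A : List Int) (out : Int) : Prop := out = solution_alt A
instance (A : List Int) (out : Int) : Decidable (Spec_solution A out) := by unfold Spec_solution; infer_instance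

-- ===== CLAIM (what is proved, stated in full; the proofs are below) =====
def Claim_equal_solution : Prop := ∀ (A : List Int), Dom_solution A → Spec_solution A (solution A)

-- ===== LEMMAS AND PROOFS =====

-- proof-side abbreviation: the flag A computes for the value pair (a, b)
def goodB (A : List Int) (a b : Int) : Bool :=
  if a > b then adjacent (PySem.List.sorted A (fun x => x) false) b a (A.length : Int)
  else if a < b then adjacent (PySem.List.sorted A (fun x => x) false) a b (A.length : Int)
  else true

-- the ordered index pairs (i < j) of a list, by structural recursion
def pairsOf : List Int → List (Int × Int)
  | [] => []
  | x :: xs => xs.map (fun y => (x, y)) ++ pairsOf xs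

-- ---- sortedness / binary search ----

theorem sorted_mono {L : List Int} (h : L.Pairwise (· ≤ ·)) {p q : Nat}
    (hpq : p ≤ q) (hq : q < L.length) : L[p] ≤ L[q] := by
  rcases Nat.lt_or_ge p q with hlt | hge
  · exact (List.pairwise_iff_getElem.mp h) p q (by omega) hq hlt
  · have : p = q := by omega
    subst this; exact le_refl _

theorem adjacentLoop_iff (L : List Int) (hs : L.Pairwise (· ≤ ·)) (i : Int) :
    ∀ (n : Nat) (lo hi : Int), (hi + 1 - lo).toNat ≤ n → 0 ≤ lo → hi < (L.length : Int) →
    (∀ k : Nat, (hk : k < L.length) → ((k : Int) < lo ∨ hi < (k : Int)) → L[k] ≠ i) →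
    (adjacentLoop L i lo hi = true ↔ i ∉ L) := by
  intro n
  induction n with
  | zero =>
    intro lo hi hn hlo hhi hinv
    have hgt : ¬ lo ≤ hi := by omega
    rw [adjacentLoop, dif_neg hgt]
    constructor
    · intro _ hmem
      obtain ⟨k, hk, hki⟩ := List.mem_iff_getElem.mp hmem
      exact hinv k hk (by omega) hki
    · intro _; rfl
  | succ n ih =>
    intro lo hi hn hlo hhi hinv
    by_cases hle : lo ≤ hi
    · obtain ⟨hm1, hm2⟩ := PySem.Int.floordiv_two_mid_bounds hle
      have hmrange : (PySem.Int.floordiv (lo + hi) 2).toNat < L.length := by omega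
      have hv := PySem.List.pyGetD_eq_getElem L (0 : Int)
        (by omega : (0:Int) ≤ PySem.Int.floordiv (lo + hi) 2) (by omega)
      rw [adjacentLoop, dif_pos hle]
      simp only []
      by_cases h1 : PySem.List.pyGetD L (PySem.Int.floordiv (lo + hi) 2) 0 > i
      · rw [if_pos h1]
        apply ih lo (PySem.Int.floordiv (lo + hi) 2 - 1) (by omega) hlo (by omega)
        intro k hk hkout
        rcases hkout with h | h
        · exact hinv k hk (Or.inl h)
        · by_cases hk2 : (k : Int) ≤ hi
          · have hmono : L[(PySem.Int.floordiv (lo + hi) 2).toNat] ≤ L[k] :=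
              sorted_mono hs (by omega) hk
            rw [hv] at h1
            exact (lt_of_lt_of_le h1 hmono).ne'
          · exact hinv k hk (Or.inr (by omega))
      · rw [if_neg h1]
        by_cases h2 : PySem.List.pyGetD L (PySem.Int.floordiv (lo + hi) 2) 0 < i
        · rw [if_pos h2]
          apply ih (PySem.Int.floordiv (lo + hi) 2 + 1) hi (by omega) (by omega) hhi
          intro k hk hkout
          rcases hkout with h | h
          · by_cases hk2 : lo ≤ (k : Int)
            · have hmono : L[k] ≤ L[(PySem.Int.floordiv (lo + hi) 2).toNat] :=
                sorted_mono hs (by omega) hmrange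
              rw [hv] at h2
              exact (lt_of_le_of_lt hmono h2).ne
            · exact hinv k hk (Or.inl (by omega))
          · exact hinv k hk (Or.inr h)
        · rw [if_neg h2]
          have heq : L[(PySem.Int.floordiv (lo + hi) 2).toNat] = i := by
            rw [hv] at h1 h2
            exact le_antisymm (not_lt.mp h1) (not_lt.mp h2)
          simp only [Bool.false_eq_true, false_iff, not_not]
          exact heq ▸ List.getElem_mem hmrange
    · rw [adjacentLoop, dif_neg hle]
      constructor
      · intro _ hmem
        obtain ⟨k, hk, hki⟩ := List.mem_iff_getElem.mp hmem
        exact hinv k hk (by omega) hki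
      · intro _; rfl

theorem adjacent_iff (A : List Int) (x y : Int) :
    (adjacent (PySem.List.sorted A (fun v => v) false) x y (A.length : Int) = true) ↔
      ∀ v ∈ A, ¬ (x < v ∧ v < y) := by
  have hs : (PySem.List.sorted A (fun v => v) false).Pairwise (· ≤ ·) :=
    PySem.List.sorted_pairwise A (fun v => v)
  have hlen : (PySem.List.sorted A (fun v => v) false).length = A.length :=
    PySem.List.length_sorted A (fun v => v) false
  have hloop : ∀ i : Int,
      (adjacentLoop (PySem.List.sorted A (fun v => v) false) i 0 ((A.length : Int) - 1) = true
        ↔ i ∉ PySem.List.sorted A (fun v => v) false) := by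
    intro i
    apply adjacentLoop_iff _ hs i ((A.length : Int) - 1 + 1 - 0).toNat 0 _ (le_refl _)
      (by omega) (by rw [hlen]; omega)
    intro k hk hout
    exfalso
    rw [hlen] at hk
    rcases hout with h | h <;> omega
  unfold adjacent
  rw [List.all_eq_true]
  constructor
  · intro h v hv hbet
    have hvr : v ∈ PySem.List.pyRange (x + 1) y 1 :=
      PySem.List.mem_pyRange_one.mpr ⟨by omega, hbet.2⟩
    have hvs : v ∈ PySem.List.sorted A (fun v => v) false :=
      (PySem.List.mem_sorted A (fun v => v) false v).mpr hv
    exact ((hloop v).mp (h v hvr)) hvs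
  · intro h i hir
    obtain ⟨hi1, hi2⟩ := PySem.List.mem_pyRange_one.mp hir
    apply (hloop i).mpr
    intro his
    exact h i ((PySem.List.mem_sorted A (fun v => v) false i).mp his) ⟨by omega, hi2⟩

theorem goodB_iff (A : List Int) (a b : Int) :
    goodB A a b = true ↔ ∀ v ∈ A, ¬ (min a b < v ∧ v < max a b) := by
  unfold goodB
  rcases lt_trichotomy a b with h | h | h
  · rw [if_neg (by omega), if_pos h,
      min_eq_left h.le, max_eq_right h.le]
    exact adjacent_iff A a b
  · subst h
    rw [if_neg (by omega), if_neg (by omega), min_self, max_self]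
    simp only [true_iff]
    intro v _ hc
    omega
  · rw [if_pos h, min_eq_right h.le, max_eq_left h.le]
    exact adjacent_iff A b a

-- ---- loop ↦ pairsOf conversion ----

theorem loops_eq_pairs_aux (f : Int → Int → Int → Int) :
    ∀ (L : List Int) (c : Int),
    (List.range (L.length - 1)).foldl (fun acc k =>
      (L.drop (k + 1)).foldl (fun acc y => f acc (L.getD k 0) y) acc) c
    = (pairsOf L).foldl (fun acc p => f acc p.1 p.2) c := by
  intro L
  induction L with
  | nil => intro c; simp [pairsOf]
  | cons x xs ih =>
    intro c
    by_cases h0 : xs = []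
    · subst h0; simp [pairsOf]
    · obtain ⟨m, hm⟩ : ∃ m, xs.length = m + 1 :=
        ⟨xs.length - 1, by have := List.length_pos_iff.mpr h0; omega⟩
      have hL : (x :: xs).length - 1 = m + 1 := by simp [hm]
      rw [hL, List.range_succ_eq_map, List.foldl_cons, List.foldl_map]
      simp only [List.getD_cons_zero, List.drop_succ_cons, List.drop_zero,
        Nat.succ_eq_add_one, List.getD_cons_succ]
      rw [show List.range m = List.range (xs.length - 1) from by rw [hm]; simp]
      rw [ih]
      show (pairsOf xs).foldl (fun acc p => f acc p.1 p.2)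
              (xs.foldl (fun acc y => f acc x y) c)
          = (pairsOf (x :: xs)).foldl (fun acc p => f acc p.1 p.2) c
      rw [show pairsOf (x :: xs) = xs.map (fun y => (x, y)) ++ pairsOf xs from rfl]
      rw [List.foldl_append, List.foldl_map]

theorem loops_eq_pairs (f : Int → Int → Int → Int) :
    ∀ (L : List Int) (c : Int),
    (PySem.List.pyRange 0 ((L.length : Int) - 1) 1).foldl (fun acc i =>
      (PySem.List.pyRange (i + 1) (L.length : Int) 1).foldl
        (fun acc j => f acc (PySem.List.pyGetD L i 0) (PySem.List.pyGetD L j 0)) acc) c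
    = (pairsOf L).foldl (fun acc p => f acc p.1 p.2) c := by
  intro L c
  rw [← loops_eq_pairs_aux f L c]
  rw [PySem.List.pyRange_one 0 ((L.length : Int) - 1), List.foldl_map]
  rw [show (((L.length : Int) - 1) - 0).toNat = L.length - 1 from by omega]
  apply PySem.List.foldl_congr_mem
  intro acc k _
  have hk1 : (0 : Int) + (k : Int) + 1 = ((k + 1 : Nat) : Int) := by omega
  have hgd : PySem.List.pyGetD L ((0 : Int) + (k : Int)) 0 = L.getD k 0 := by
    rw [show (0 : Int) + (k : Int) = ((k : Nat) : Int) from by omega]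
    exact PySem.List.pyGetD_natCast L k 0
  rw [hk1, hgd]
  have h := PySem.List.foldl_pyRange_pyGetD L 0
    (fun acc y => f acc (L.getD k 0) y) acc (a := ((k + 1 : Nat) : Int)) (by positivity)
  rw [show (((k + 1 : Nat) : Int)).toNat = k + 1 from by omega] at h
  exact h

theorem foldl_ite_min (P : Int × Int → Bool) (d : Int × Int → Int) :
    ∀ (l : List (Int × Int)) (c : Int),
      l.foldl (fun acc p => if P p then min acc (d p) else acc) c
        = ((l.filter P).map d).foldl min c := by
  intro l
  induction l with
  | nil => intro c; simp
  | cons a t ih =>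
    intro c
    by_cases hp : P a = true
    · simp [hp, ih]
    · simp [hp, ih]

-- ---- foldl min machinery ----

theorem fmin_le_init : ∀ (l : List Int) (c : Int), l.foldl min c ≤ c := by
  intro l
  induction l with
  | nil => intro c; simp
  | cons a t ih =>
    intro c
    calc (a :: t).foldl min c = t.foldl min (min c a) := by simp
    _ ≤ min c a := ih _
    _ ≤ c := min_le_left _ _

theorem fmin_le_mem : ∀ (l : List Int) (c x : Int), x ∈ l → l.foldl min c ≤ x := by
  intro l
  induction l with
  | nil => intro c x hx; simp at hx
  | cons a t ih =>
    intro c x hx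
    rcases List.mem_cons.mp hx with rfl | hx
    · calc (x :: t).foldl min c = t.foldl min (min c x) := by simp
      _ ≤ min c x := fmin_le_init _ _
      _ ≤ x := min_le_right _ _
    · simpa using ih (min c a) x hx

theorem fmin_cases : ∀ (l : List Int) (c : Int), l.foldl min c = c ∨ l.foldl min c ∈ l := by
  intro l
  induction l with
  | nil => intro c; simp
  | cons a t ih =>
    intro c
    rcases ih (min c a) with h | h
    · rcases min_cases c a with ⟨h2, _⟩ | ⟨h2, _⟩
      · left; simpa [h2] using h
      · right; simp only [List.foldl_cons]; rw [h, h2]; exact List.mem_cons_self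
    · right; simp only [List.foldl_cons]; exact List.mem_cons_of_mem _ h

theorem fmin_le_of_dom {l1 l2 : List Int} (c : Int)
    (h : ∀ x ∈ l1, ∃ y ∈ l2, y ≤ x) : l2.foldl min c ≤ l1.foldl min c := by
  rcases fmin_cases l1 c with h1 | h1
  · rw [h1]; exact fmin_le_init _ _
  · obtain ⟨y, hy, hyx⟩ := h _ h1
    exact le_trans (fmin_le_mem _ _ _ hy) hyx

theorem fmin_eq_of_dom {l1 l2 : List Int} (c : Int)
    (h1 : ∀ x ∈ l1, ∃ y ∈ l2, y ≤ x) (h2 : ∀ y ∈ l2, ∃ x ∈ l1, x ≤ y) :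
    l1.foldl min c = l2.foldl min c := by
  exact le_antisymm (fmin_le_of_dom c h2) (fmin_le_of_dom c h1)

-- ---- pairsOf lemmas ----

theorem mem_pairsOf_of_getElem : ∀ (L : List Int) (i j : Nat) (hij : i < j) (hj : j < L.length),
    (L[i]'(by omega), L[j]) ∈ pairsOf L := by
  intro L
  induction L with
  | nil => intro i j hij hj; simp at hj
  | cons x xs ih =>
    intro i j hij hj
    match i, j with
    | 0, j + 1 =>
      have hj' : j < xs.length := by simpa using hj
      apply List.mem_append_left
      simp only [List.getElem_cons_zero, List.getElem_cons_succ]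
      exact List.mem_map.mpr ⟨xs[j], List.getElem_mem _, rfl⟩
    | i + 1, j + 1 =>
      apply List.mem_append_right
      simp only [List.getElem_cons_succ]
      exact ih i j (by omega) (by simpa using hj)

theorem getElem_of_mem_pairsOf : ∀ (L : List Int) (p : Int × Int), p ∈ pairsOf L →
    ∃ (i j : Nat) (hij : i < j) (hj : j < L.length), L[i]'(by omega) = p.1 ∧ L[j] = p.2 := by
  intro L
  induction L with
  | nil => intro p hp; simp [pairsOf] at hp
  | cons x xs ih =>
    intro p hp
    rcases List.mem_append.mp hp with hp | hp
    · obtain ⟨y, hy, rfl⟩ := List.mem_map.mp hp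
      obtain ⟨m, hm, hym⟩ := List.mem_iff_getElem.mp hy
      exact ⟨0, m + 1, by omega, by simpa using hm, by simp, by simpa using hym⟩
    · obtain ⟨i, j, hij, hj, h1, h2⟩ := ih p hp
      exact ⟨i + 1, j + 1, by omega, by simpa using hj, by simpa using h1, by simpa using h2⟩

theorem mem_of_mem_pairsOf {L : List Int} {p : Int × Int} (hp : p ∈ pairsOf L) :
    p.1 ∈ L ∧ p.2 ∈ L := by
  obtain ⟨i, j, hij, hj, h1, h2⟩ := getElem_of_mem_pairsOf L p hp
  exact ⟨h1 ▸ List.getElem_mem _, h2 ▸ List.getElem_mem _⟩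

theorem pairsOf_of_mem_ne : ∀ (L : List Int) (x y : Int), x ∈ L → y ∈ L → x ≠ y →
    (x, y) ∈ pairsOf L ∨ (y, x) ∈ pairsOf L := by
  intro L
  induction L with
  | nil => intro x y hx _ _; simp at hx
  | cons a t ih =>
    intro x y hx hy hne
    by_cases hxa : x = a
    · have hyt : y ∈ t := by
        rcases List.mem_cons.mp hy with h | h
        · exact absurd (h.trans hxa.symm).symm hne
        · exact h
      left
      exact List.mem_append_left _ (List.mem_map.mpr ⟨y, hyt, by rw [hxa]⟩)
    · by_cases hya : y = a
      · have hxt : x ∈ t := (List.mem_cons.mp hx).resolve_left hxa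
        right
        exact List.mem_append_left _ (List.mem_map.mpr ⟨x, hxt, by rw [hya]⟩)
      · have hxt : x ∈ t := (List.mem_cons.mp hx).resolve_left hxa
        have hyt : y ∈ t := (List.mem_cons.mp hy).resolve_left hya
        rcases ih x y hxt hyt hne with h | h
        · exact Or.inl (List.mem_append_right _ h)
        · exact Or.inr (List.mem_append_right _ h)

theorem pairsOf_diag_iff : ∀ (L : List Int) (x : Int), (x, x) ∈ pairsOf L ↔ 2 ≤ L.count x := by
  intro L
  induction L with
  | nil => intro x; simp [pairsOf]
  | cons a t ih =>
    intro x
    have hmap : (x, x) ∈ t.map (fun z => (a, z)) ↔ a = x ∧ x ∈ t := by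
      constructor
      · intro h
        obtain ⟨z, hz, hzx⟩ := List.mem_map.mp h
        have h1 : a = x := congrArg Prod.fst hzx
        have h2 : z = x := congrArg Prod.snd hzx
        exact ⟨h1, h2 ▸ hz⟩
      · rintro ⟨h1, hx⟩
        exact List.mem_map.mpr ⟨x, hx, by rw [h1]⟩
    have hcount : (a :: t).count x = t.count x + (if a = x then 1 else 0) := by
      by_cases hax : a = x
      · simp [hax]
      · simp [hax]
    constructor
    · intro h
      rcases List.mem_append.mp h with h | h
      · obtain ⟨h1, h2⟩ := hmap.mp h
        have : 1 ≤ t.count x := List.count_pos_iff.mpr h2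
        rw [hcount, if_pos h1]; omega
      · have := (ih x).mp h
        rw [hcount]; omega
    · intro h
      rw [hcount] at h
      by_cases hax : a = x
      · rw [if_pos hax] at h
        by_cases h2 : 2 ≤ t.count x
        · exact List.mem_append_right _ ((ih x).mpr h2)
        · exact List.mem_append_left _ (hmap.mpr ⟨hax, List.count_pos_iff.mp (by omega)⟩)
      · rw [if_neg hax] at h
        exact List.mem_append_right _ ((ih x).mpr h)

theorem pairs_transfer {L M : List Int} (hperm : L.Perm M) (p : Int × Int)
    (hp : p ∈ pairsOf L) : (p.1, p.2) ∈ pairsOf M ∨ (p.2, p.1) ∈ pairsOf M := by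
  by_cases heq : p.1 = p.2
  · left
    have hd : (p.1, p.1) ∈ pairsOf L := by
      have : p = (p.1, p.2) := rfl
      rw [this, ← heq] at hp; exact hp
    have := (pairsOf_diag_iff L p.1).mp hd
    rw [hperm.count_eq p.1] at this
    have := (pairsOf_diag_iff M p.1).mpr this
    rw [show ((p.1 : Int), p.2) = (p.1, p.1) from by rw [heq]]
    exact this
  · obtain ⟨h1, h2⟩ := mem_of_mem_pairsOf hp
    exact pairsOf_of_mem_ne M p.1 p.2 (hperm.mem_iff.mp h1) (hperm.mem_iff.mp h2) heq

-- ---- the sorted walk: a gap-free pair is realised by a consecutive pair ----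

theorem walk (s : List Int) (hs : s.Pairwise (· ≤ ·)) (a b : Int)
    (hnb : ∀ v ∈ s, ¬ (a < v ∧ v < b)) :
    ∀ (d p q : Nat) (_hd : q - p ≤ d) (hpq : p < q) (hq : q < s.length),
    s[p]'(by omega) = a → s[q] = b →
    ∃ k, ∃ (hk : k + 1 < s.length), s[k + 1] - s[k] = b - a := by
  intro d
  induction d with
  | zero => intro p q hd hpq; omega
  | succ d ih =>
    intro p q hd hpq hq hpa hqb
    by_cases hq1 : q = p + 1
    · subst hq1
      exact ⟨p, hq, by rw [hpa, hqb]⟩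
    · have hp1q : p + 1 < q := by omega
      have hv1 : s[p]'(by omega) ≤ s[p + 1]'(by omega) := sorted_mono hs (by omega) (by omega)
      have hv2 : s[p + 1]'(by omega) ≤ s[q] := sorted_mono hs (by omega) hq
      have hvmem : s[p + 1]'(by omega) ∈ s := List.getElem_mem _
      have := hnb _ hvmem
      rw [hpa] at hv1
      rw [hqb] at hv2
      rcases eq_or_lt_of_le hv1 with heq | hlt
      · exact ih (p + 1) q (by omega) hp1q hq heq.symm hqb
      · have hvb : s[p + 1]'(by omega) = b := by
          rcases eq_or_lt_of_le hv2 with h | h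
          · exact h
          · exact absurd ⟨hlt, h⟩ this
        exact ⟨p, by omega, by rw [hvb, hpa]⟩

-- ---- assembling both sides ----

theorem solution_eq_fold (A : List Int) :
    solution A = (((pairsOf A).filter (fun p => goodB A p.1 p.2)).map
      (fun p => |p.1 - p.2|)).foldl min 1000000000 := by
  rw [← foldl_ite_min (fun p => goodB A p.1 p.2) (fun p => |p.1 - p.2|)]
  exact loops_eq_pairs (fun acc u v =>
    if (if u > v then adjacent (PySem.List.sorted A (fun x => x) false) v u (A.length : Int)
        else if u < v then adjacent (PySem.List.sorted A (fun x => x) false) u v (A.length : Int)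
        else true) then min acc |u - v| else acc) A 1000000000

theorem alt_eq_fold (A : List Int) :
    solution_alt A =
      (((PySem.List.sorted A (fun x => x) false).zip
          ((PySem.List.sorted A (fun x => x) false).drop 1)).map
        (fun p => p.2 - p.1)).foldl min 1000000000 := by
  have hslice : PySem.List.slice (PySem.List.sorted A (fun x => x) false) (some 1) none
      = (PySem.List.sorted A (fun x => x) false).drop 1 := by
    simpa using PySem.List.slice_from_natCast (PySem.List.sorted A (fun x => x) false) 1
  show ((PySem.List.sorted A (fun x => x) false).zip
      (PySem.List.slice (PySem.List.sorted A (fun x => x) false) (some 1) none)).foldl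
      (fun answer p => min answer (p.2 - p.1)) 1000000000 = _
  rw [hslice, List.foldl_map]

theorem mem_zip_drop_iff (s : List Int) (p : Int × Int) :
    p ∈ s.zip (s.drop 1) ↔ ∃ k, ∃ (hk : k + 1 < s.length), p = (s[k]'(by omega), s[k + 1]) := by
  constructor
  · intro hp
    obtain ⟨k, hk, hpk⟩ := List.mem_iff_getElem.mp hp
    have hlen : k + 1 < s.length := by
      have := hk
      simp [List.length_zip] at this
      omega
    refine ⟨k, hlen, ?_⟩
    rw [← hpk]
    rw [List.getElem_zip]
    congr 1
    rw [List.getElem_drop]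
    congr 1
    omega
  · rintro ⟨k, hk, rfl⟩
    apply List.mem_iff_getElem.mpr
    refine ⟨k, ?_, ?_⟩
    · simp [List.length_zip]; omega
    · rw [List.getElem_zip]
      congr 1
      rw [List.getElem_drop]
      congr 1
      omega

theorem solution_eq_alt (A : List Int) : solution A = solution_alt A := by
  rw [solution_eq_fold, alt_eq_fold]
  set s := PySem.List.sorted A (fun x => x) false with hsdef
  have hs : s.Pairwise (· ≤ ·) := PySem.List.sorted_pairwise A (fun x => x)
  have hperm : s.Perm A := PySem.List.sorted_perm A (fun x => x) false
  have hmem : ∀ v, v ∈ s ↔ v ∈ A := PySem.List.mem_sorted A (fun x => x) false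
  apply fmin_eq_of_dom
  · -- every good-pair diff of A is matched (dominated) by a consecutive diff of s
    intro e he
    obtain ⟨p, hpf, hpe⟩ := List.mem_map.mp he
    have hpp : p ∈ pairsOf A := (List.mem_filter.mp hpf).1
    have hgood : goodB A p.1 p.2 = true := (List.mem_filter.mp hpf).2
    have hnb : ∀ v ∈ s, ¬ (min p.1 p.2 < v ∧ v < max p.1 p.2) := by
      intro v hv
      exact (goodB_iff A p.1 p.2).mp hgood v ((hmem v).mp hv)
    -- move the pair into s (up to swap) and take positions there
    have hps : (p.1, p.2) ∈ pairsOf s ∨ (p.2, p.1) ∈ pairsOf s :=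
      pairs_transfer hperm.symm p hpp
    have hpos : ∃ (i j : Nat) (hij : i < j) (hj : j < s.length),
        (s[i]'(by omega) = min p.1 p.2 ∧ s[j] = max p.1 p.2) := by
      rcases hps with h | h
      · obtain ⟨i, j, hij, hj, h1, h2⟩ := getElem_of_mem_pairsOf s _ h
        have hmono := sorted_mono hs (le_of_lt hij) hj
        exact ⟨i, j, hij, hj, by rw [h1] at hmono ⊢; rw [h2] at hmono; omega,
          by rw [h2] at hmono ⊢; rw [h1] at hmono; omega⟩
      · obtain ⟨i, j, hij, hj, h1, h2⟩ := getElem_of_mem_pairsOf s _ h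
        have hmono := sorted_mono hs (le_of_lt hij) hj
        exact ⟨i, j, hij, hj, by rw [h1] at hmono ⊢; rw [h2] at hmono; omega,
          by rw [h2] at hmono ⊢; rw [h1] at hmono; omega⟩
    obtain ⟨i, j, hij, hj, h1, h2⟩ := hpos
    obtain ⟨k, hk, hdk⟩ := walk s hs (min p.1 p.2) (max p.1 p.2) hnb (j - i) i j
      (le_refl _) hij hj h1 h2
    refine ⟨s[k + 1] - s[k]'(by omega), ?_, ?_⟩
    · apply List.mem_map.mpr
      refine ⟨(s[k]'(by omega), s[k + 1]), ?_, rfl⟩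
      exact (mem_zip_drop_iff s _).mpr ⟨k, hk, rfl⟩
    · rw [hdk, ← hpe]
      have : |p.1 - p.2| = max p.1 p.2 - min p.1 p.2 := by
        rcases le_total p.1 p.2 with hc | hc
        · rw [abs_of_nonpos (by omega)]; omega
        · rw [abs_of_nonneg (by omega)]; omega
      omega
  · -- every consecutive diff of s is matched by a good-pair diff of A
    intro d hd
    obtain ⟨q, hqz, hqd⟩ := List.mem_map.mp hd
    obtain ⟨k, hk, hq⟩ := (mem_zip_drop_iff s q).mp hqz
    have hqd' : s[k + 1] - s[k]'(by omega) = d := by rw [← hqd, hq]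
    have hle : s[k]'(by omega) ≤ s[k + 1] := sorted_mono hs (by omega) hk
    have hpairS : (s[k]'(by omega), s[k + 1]) ∈ pairsOf s :=
      mem_pairsOf_of_getElem s k (k + 1) (by omega) hk
    have hpairA : (s[k]'(by omega), s[k + 1]) ∈ pairsOf A ∨
        (s[k + 1], s[k]'(by omega)) ∈ pairsOf A :=
      pairs_transfer hperm _ hpairS
    have hgoodv : ∀ (u v : Int), min u v = s[k]'(by omega) → max u v = s[k + 1] →
        goodB A u v = true := by
      intro u v hmin hmax
      apply (goodB_iff A u v).mpr
      intro w hw hbet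
      rw [hmin, hmax] at hbet
      have hws : w ∈ s := (hmem w).mpr hw
      obtain ⟨m, hm, hwm⟩ := List.mem_iff_getElem.mp hws
      by_cases hmk : m ≤ k
      · have : s[m] ≤ s[k]'(by omega) := sorted_mono hs hmk (by omega)
        omega
      · have : s[k + 1] ≤ s[m] := sorted_mono hs (by omega) hm
        omega
    have habs : |s[k]'(by omega) - s[k + 1]| = s[k + 1] - s[k]'(by omega) := by
      rw [abs_of_nonpos (by omega)]; ring
    rcases hpairA with h | h
    · refine ⟨s[k + 1] - s[k]'(by omega), ?_, by omega⟩
      apply List.mem_map.mpr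
      refine ⟨(s[k]'(by omega), s[k + 1]), ?_, habs⟩
      exact List.mem_filter.mpr ⟨h, hgoodv _ _ (min_eq_left hle) (max_eq_right hle)⟩
    · refine ⟨s[k + 1] - s[k]'(by omega), ?_, by omega⟩
      apply List.mem_map.mpr
      refine ⟨(s[k + 1], s[k]'(by omega)), ?_, by rw [abs_sub_comm]; exact habs⟩
      exact List.mem_filter.mpr ⟨h, hgoodv _ _ (min_eq_right hle) (max_eq_left hle)⟩

-- ===== VERDICT (by name: the statement is the Claim_ definition above) =====
theorem solution_spec : Claim_equal_solution := by
  intro A _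
  unfold Spec_solution
  exact solution_eq_alt A
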